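-- pv_equiv track=rewrite | github.com/StanislawSzataniak/KCK---sheet-music | SheetMusicReader.py | detect_staffs
-- ===== SOURCE A (Python) =====
-- LINES_DISTANCE_THRESHOLD = 50
--
-- def detect_staffs(all_lines):
--     staffs = []
--     lines = []
--     for current_line in all_lines:
--         if lines and abs(lines[-1] - current_line) > LINES_DISTANCE_THRESHOLD:
--             if len(lines) >= 5:
--                 staffs.append((lines[0], lines[-1]))
--             lines.clear()
--         lines.append(current_line)
--
--     if len(lines) >= 5:
--         if abs(lines[-2] - lines[-1]) <= LINES_DISTANCE_THRESHOLD: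
--             staffs.append((lines[0], lines[-1]))
--     return staffs
-- ===== SOURCE B (Python) =====
-- LINES_DISTANCE_THRESHOLD = 50
--
-- def detect_staffs(all_lines):
--     # Index-based: compute the gap boundary positions first, then slice by
--     # consecutive cut pairs; no run state or run lists are ever maintained.
--     n = len(all_lines)
--     cuts = [0] + [i for i in range(1, n)
--                   if abs(all_lines[i] - all_lines[i - 1]) > LINES_DISTANCE_THRESHOLD] + [n]
--     return [(all_lines[s], all_lines[e - 1])
--             for s, e in zip(cuts, cuts[1:]) if e - s >= 5]
-- ===== Notes on version B (the rewrite author's own statement) =====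
-- stated objective: alternative
-- what changed: B is index-based: it computes the list of gap boundary positions (cut indices) first and then shapes the result directly from consecutive cut-index pairs, maintaining no run state and never touching the element sequence itself, unlike A's stateful run-accumulating loop with a special post-loop block.
import Mathlib
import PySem

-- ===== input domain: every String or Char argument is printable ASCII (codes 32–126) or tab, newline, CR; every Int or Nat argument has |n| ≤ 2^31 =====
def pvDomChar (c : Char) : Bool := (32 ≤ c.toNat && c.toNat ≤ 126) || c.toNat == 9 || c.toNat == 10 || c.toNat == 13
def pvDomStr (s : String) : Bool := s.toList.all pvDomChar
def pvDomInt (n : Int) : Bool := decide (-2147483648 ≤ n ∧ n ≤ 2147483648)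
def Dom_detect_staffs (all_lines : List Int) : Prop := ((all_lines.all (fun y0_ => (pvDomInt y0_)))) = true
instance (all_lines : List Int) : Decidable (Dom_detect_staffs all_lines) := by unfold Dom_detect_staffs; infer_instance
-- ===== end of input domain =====

-- ===== PORT A =====
-- B replaces A's stateful run-accumulating loop by an index-based two-phase computation:
-- it first collects the gap boundary positions, then shapes the answer from consecutive
-- cut-index pairs (objective: alternative; no run state is ever maintained).
def pvThreshold : Int := 50

-- one iteration of A's for-loop over (staffs, lines)
def pvStepA (st : List (Int × Int) × List Int) (cur : Int) : List (Int × Int) × List Int :=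
  let staffs := st.1
  let lines := st.2
  if lines ≠ [] ∧ |lines.getLast! - cur| > pvThreshold then
    ((if 5 ≤ lines.length then staffs ++ [(lines.head!, lines.getLast!)] else staffs), [cur])
  else
    (staffs, lines ++ [cur])

def detect_staffs (all_lines : List Int) : List (Int × Int) :=
  let st := all_lines.foldl pvStepA ([], [])
  let staffs := st.1
  let lines := st.2
  if 5 ≤ lines.length then
    -- lines[-2] = lines.dropLast.getLast!, lines[-1] = lines.getLast!; in bounds since 5 ≤ length
    if |lines.dropLast.getLast! - lines.getLast!| ≤ pvThreshold then
      staffs ++ [(lines.head!, lines.getLast!)]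
    else staffs
  else staffs

-- ===== PORT B =====
-- all_lines[i] for 0 ≤ i < n is ported as pyGetD _ i 0: exact, every index used is in range.
def detect_staffs_alt (all_lines : List Int) : List (Int × Int) :=
  let n : Int := all_lines.length
  let cuts : List Int :=
    [0] ++ (PySem.List.pyRange 1 n 1).filter
      (fun i => pvThreshold <
        |PySem.List.pyGetD all_lines i 0 - PySem.List.pyGetD all_lines (i - 1) 0|) ++ [n]
  ((cuts.zip cuts.tail).filter (fun p => 5 ≤ p.2 - p.1)).map
    (fun p => (PySem.List.pyGetD all_lines p.1 0, PySem.List.pyGetD all_lines (p.2 - 1) 0))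

-- ===== PRECONDITION & SPEC =====
def Spec_detect_staffs (all_lines : List Int) (out : List (Int × Int)) : Prop := out = detect_staffs_alt all_lines
instance (all_lines : List Int) (out : List (Int × Int)) : Decidable (Spec_detect_staffs all_lines out) := by unfold Spec_detect_staffs; infer_instance

-- ===== CLAIM (what is proved, stated in full; the proofs are below) =====
def Claim_equal_detect_staffs : Prop := ∀ (all_lines : List Int), Dom_detect_staffs all_lines → Spec_detect_staffs all_lines (detect_staffs all_lines)

-- ===== LEMMAS AND PROOFS =====

-- gap boundary positions of a, as Nat indices (the "mid" cuts, strictly between 0 and n)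
def pvMids (a : List Int) : List Nat :=
  (List.range a.length).filter
    (fun i => decide (i ≠ 0) && decide (pvThreshold < |a.getD i 0 - a.getD (i - 1) 0|))

-- the position where the final (open) run starts
def pvLastCut (a : List Int) : Nat := (0 :: pvMids a).getLast (by simp)

def pvPairs (l : List Nat) : List (Nat × Nat) := l.zip l.tail

def pvShapeP (a : List Int) (ps : List (Nat × Nat)) : List (Int × Int) :=
  (ps.filter (fun p => p.1 + 5 ≤ p.2)).map (fun p => (a.getD p.1 0, a.getD (p.2 - 1) 0))

-- basic list facts ---------------------------------------------------------

lemma pvGetLast!_cons {x : Int} {l : List Int} (h : l ≠ []) :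
    (x :: l).getLast! = l.getLast! := by
  cases l with
  | nil => exact absurd rfl h
  | cons y ys => rfl

lemma pvGetLast!_eq_getD (l : List Int) (h : l ≠ []) :
    l.getLast! = l.getD (l.length - 1) 0 := by
  induction l with
  | nil => exact absurd rfl h
  | cons x xs ih =>
    cases xs with
    | nil => rfl
    | cons y ys =>
      rw [pvGetLast!_cons (by simp), ih (by simp)]
      have hidx : (x :: y :: ys).length - 1 = ((y :: ys).length - 1) + 1 := by simp
      rw [hidx, List.getD_cons_succ]

lemma pvGetLast!_drop (l : List Int) (m : Nat) (h : l.drop m ≠ []) :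
    (l.drop m).getLast! = l.getLast! := by
  induction l generalizing m with
  | nil => simp at h
  | cons x xs ih =>
    cases m with
    | zero => simp
    | succ k =>
      have hxs : xs.drop k ≠ [] := by simpa using h
      have hne : xs ≠ [] := by intro hc; subst hc; simp at hxs
      rw [List.drop_succ_cons, ih k hxs, pvGetLast!_cons hne]

lemma pvHead!_drop (l : List Int) (m : Nat) (h : m < l.length) :
    (l.drop m).head! = l.getD m 0 := by
  induction l generalizing m with
  | nil => simp at h
  | cons x xs ih =>
    cases m with
    | zero => simp
    | succ k =>
      rw [List.drop_succ_cons, ih k (by simpa using h), List.getD_cons_succ]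

lemma pvPairs_snoc (l : List Nat) (h : l ≠ []) (x : Nat) :
    pvPairs (l ++ [x]) = pvPairs l ++ [(l.getLast h, x)] := by
  induction l with
  | nil => exact absurd rfl h
  | cons y ys ih =>
    cases ys with
    | nil => simp [pvPairs]
    | cons z zs =>
      have := ih (by simp)
      simp only [pvPairs] at this ⊢
      simp only [List.cons_append, List.zip_cons_cons, List.tail_cons] at this ⊢
      rw [this]
      simp [List.getLast_cons]

lemma pvChain_le_getLast (l : List Nat) (hp : l.Pairwise (· < ·)) (h : l ≠ []) :
    ∀ x ∈ l, x ≤ l.getLast h := by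
  induction l with
  | nil => exact absurd rfl h
  | cons y ys ih =>
    intro x hx
    cases ys with
    | nil => simp at hx; simp [hx]
    | cons z zs =>
      rw [List.getLast_cons (by simp)]
      rcases List.mem_cons.mp hx with rfl | hx'
      · have : z ∈ z :: zs := by simp
        have hlt := (List.pairwise_cons.mp hp).1 _ this
        have := ih (List.pairwise_cons.mp hp).2 (by simp) z (by simp)
        omega
      · exact ih (List.pairwise_cons.mp hp).2 (by simp) x hx'

-- facts about pvMids / pvLastCut -------------------------------------------

lemma pvMids_mem {a : List Int} {i : Nat} (h : i ∈ pvMids a) :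
    i ≠ 0 ∧ i < a.length ∧ pvThreshold < |a.getD i 0 - a.getD (i - 1) 0| := by
  simp only [pvMids, List.mem_filter, List.mem_range, Bool.and_eq_true, decide_eq_true_eq] at h
  exact ⟨h.2.1, h.1, h.2.2⟩

lemma pvMids_pairwise (a : List Int) : (pvMids a).Pairwise (· < ·) :=
  List.Pairwise.filter _ (List.pairwise_lt_range)

lemma pvCuts_pairwise (a : List Int) : (0 :: pvMids a).Pairwise (· < ·) := by
  refine List.pairwise_cons.mpr ⟨?_, pvMids_pairwise a⟩
  intro i hi
  have := (pvMids_mem hi).1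
  omega

lemma pvLastCut_le (a : List Int) : pvLastCut a ≤ a.length := by
  have hmem := List.getLast_mem (l := 0 :: pvMids a) (by simp)
  rcases List.mem_cons.mp hmem with h | h
  · rw [pvLastCut, h]; omega
  · have := (pvMids_mem h).2.1
    rw [pvLastCut]; omega

lemma pvLastCut_lt (a : List Int) (h : a ≠ []) : pvLastCut a < a.length := by
  have hmem := List.getLast_mem (l := 0 :: pvMids a) (by simp)
  have hlen : 0 < a.length := List.length_pos_iff.mpr h
  rcases List.mem_cons.mp hmem with h' | h'
  · rw [pvLastCut, h']; omega
  · have := (pvMids_mem h').2.1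
    rw [pvLastCut]; omega

lemma pvMids_le_lastCut {a : List Int} {i : Nat} (h : i ∈ pvMids a) : i ≤ pvLastCut a :=
  pvChain_le_getLast _ (pvCuts_pairwise a) (by simp) i (by simp [h])

-- no gap strictly after the last cut
lemma pvNoGap (a : List Int) {i : Nat} (h1 : pvLastCut a < i) (h2 : i < a.length) :
    |a.getD i 0 - a.getD (i - 1) 0| ≤ pvThreshold := by
  by_contra hc
  push_neg at hc
  have hi : i ∈ pvMids a := by
    simp only [pvMids, List.mem_filter, List.mem_range, Bool.and_eq_true, decide_eq_true_eq]
    exact ⟨h2, by omega, hc⟩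
  have := pvMids_le_lastCut hi
  omega

-- snoc behaviour of pvMids --------------------------------------------------

lemma pvMids_snoc (a : List Int) (x : Int) :
    pvMids (a ++ [x]) =
      pvMids a ++ (if a ≠ [] ∧ pvThreshold < |a.getLast! - x| then [a.length] else []) := by
  unfold pvMids
  rw [show (a ++ [x]).length = a.length + 1 by simp, List.range_succ, List.filter_append]
  congr 1
  · apply List.filter_congr
    intro i hi
    have hilt : i < a.length := List.mem_range.mp hi
    congr 1
    rw [List.getD_append _ _ _ _ hilt, List.getD_append _ _ _ _ (by omega)]
  · by_cases hne : a = []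
    · subst hne; simp
    · have hlen : 0 < a.length := List.length_pos_iff.mpr hne
      have hx : (a ++ [x]).getD a.length 0 = x := by
        rw [List.getD_eq_getElem?_getD, List.getElem?_append_right (by omega)]
        simp
      have hlast : (a ++ [x]).getD (a.length - 1) 0 = a.getLast! := by
        rw [List.getD_append _ _ _ _ (by omega), pvGetLast!_eq_getD a hne]
      have hfil : [a.length].filter
          (fun i => decide (i ≠ 0) &&
            decide (pvThreshold < |(a ++ [x]).getD i 0 - (a ++ [x]).getD (i - 1) 0|)) =
          if pvThreshold < |x - a.getLast!| then [a.length] else [] := by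
        simp only [List.filter_cons, List.filter_nil, hx, hlast]
        have hiff : (decide (a.length ≠ 0) &&
            decide (pvThreshold < |x - a.getLast!|)) = true ↔
            pvThreshold < |x - a.getLast!| := by
          simp [Nat.pos_iff_ne_zero.mp hlen]
        by_cases hgap : pvThreshold < |x - a.getLast!|
        · rw [if_pos (hiff.mpr hgap), if_pos hgap]
        · rw [if_neg (fun hc => hgap (hiff.mp hc)), if_neg hgap]
      rw [hfil]
      by_cases hgap : pvThreshold < |x - a.getLast!|
      · rw [if_pos hgap, if_pos ⟨hne, by rwa [abs_sub_comm] at hgap⟩]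
      · rw [if_neg hgap, if_neg (by rintro ⟨-, hgg⟩; rw [abs_sub_comm] at hgg; exact hgap hgg)]

-- pvShapeP only reads indices below every pair's second component -----------

lemma pvShapeP_append (a : List Int) (ps : List (Nat × Nat)) (q : Nat × Nat) :
    pvShapeP a (ps ++ [q]) =
      pvShapeP a ps ++ (if q.1 + 5 ≤ q.2 then [(a.getD q.1 0, a.getD (q.2 - 1) 0)] else []) := by
  simp only [pvShapeP, List.filter_append, List.map_append]
  by_cases h : q.1 + 5 ≤ q.2 <;> simp [h]

lemma pvShapeP_extend (a : List Int) (ys : List Int) (ps : List (Nat × Nat))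
    (hb : ∀ p ∈ ps, p.2 ≤ a.length) :
    pvShapeP (a ++ ys) ps = pvShapeP a ps := by
  simp only [pvShapeP]
  apply List.map_congr_left
  intro p hp
  have hmem := List.mem_filter.mp hp
  have h2 : p.2 ≤ a.length := hb p hmem.1
  have h5 : p.1 + 5 ≤ p.2 := by simpa using hmem.2
  rw [List.getD_append _ _ _ _ (by omega), List.getD_append _ _ _ _ (by omega)]

lemma pvPairs_cuts_bound (a : List Int) :
    ∀ p ∈ pvPairs (0 :: pvMids a), p.2 ≤ a.length := by
  intro p hp
  have h2 : p.2 ∈ pvMids a := by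
    have := List.of_mem_zip hp
    have ht : p.2 ∈ (0 :: pvMids a).tail := this.2
    simpa using ht
  exact le_of_lt (pvMids_mem h2).2.1

-- the main invariant, by snoc induction -------------------------------------

lemma pvInv (a : List Int) :
    (a.foldl pvStepA ([], [])).2 = a.drop (pvLastCut a) ∧
    (a.foldl pvStepA ([], [])).1 = pvShapeP a (pvPairs (0 :: pvMids a)) := by
  induction a using List.reverseRecOn with
  | nil => simp [pvLastCut, pvMids, pvPairs, pvShapeP]
  | append_singleton a x ih =>
    obtain ⟨ih2, ih1⟩ := ih
    rw [List.foldl_append, List.foldl_cons, List.foldl_nil]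
    set st := a.foldl pvStepA ([], []) with hst
    set m := pvLastCut a with hm
    by_cases hc : st.2 ≠ [] ∧ |st.2.getLast! - x| > pvThreshold
    · -- a new cut at position a.length
      have hane : a ≠ [] := by
        intro h; subst h
        simp [pvLastCut, pvMids] at ih2
        exact hc.1 ih2
      have hmlt : m < a.length := pvLastCut_lt a hane
      have hdropne : a.drop m ≠ [] := by
        simp only [ne_eq, List.drop_eq_nil_iff]; omega
      have hlastst : st.2.getLast! = a.getLast! := by
        rw [ih2, pvGetLast!_drop a m hdropne]
      have hcond : a ≠ [] ∧ pvThreshold < |a.getLast! - x| := ⟨hane, by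
        have := hc.2; rwa [hlastst] at this⟩
      have hmids : pvMids (a ++ [x]) = pvMids a ++ [a.length] := by
        rw [pvMids_snoc, if_pos hcond]
      have hlast' : pvLastCut (a ++ [x]) = a.length := by
        rw [pvLastCut]
        simp [hmids, List.getLast_append]
      constructor
      · -- second component: the new open run is [x]
        rw [pvStepA, if_pos hc, hlast']
        simp
      · rw [pvStepA, if_pos hc]
        simp only
        rw [hmids, show (0 : Nat) :: (pvMids a ++ [a.length]) = (0 :: pvMids a) ++ [a.length] by simp,
          pvPairs_snoc (0 :: pvMids a) (by simp) a.length, pvShapeP_append,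
          pvShapeP_extend a [x] _ (pvPairs_cuts_bound a), ← ih1]
        have hlen : st.2.length = a.length - m := by rw [ih2]; simp
        have hgl : (0 :: pvMids a).getLast (by simp) = m := rfl
        rw [hgl]
        have e1 : st.2.head! = (a ++ [x]).getD m 0 := by
          rw [ih2, pvHead!_drop a m hmlt, List.getD_append _ _ _ _ hmlt]
        have e2 : st.2.getLast! = (a ++ [x]).getD (a.length - 1) 0 := by
          rw [hlastst, pvGetLast!_eq_getD a hane, List.getD_append _ _ _ _ (by omega)]
        by_cases h5 : 5 ≤ st.2.length
        · rw [if_pos h5, if_pos (by omega)]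
          simp only [e1, e2]
        · rw [if_neg h5, if_neg (by omega)]
          simp
    · -- no new cut: the open run is extended
      have hcond : ¬(a ≠ [] ∧ pvThreshold < |a.getLast! - x|) := by
        rintro ⟨hane, hgap⟩
        apply hc
        have hmlt : m < a.length := pvLastCut_lt a hane
        have hdropne : a.drop m ≠ [] := by
          simp only [ne_eq, List.drop_eq_nil_iff]; omega
        refine ⟨by rw [ih2]; exact hdropne, ?_⟩
        rw [ih2, pvGetLast!_drop a m hdropne]
        exact hgap
      have hmids : pvMids (a ++ [x]) = pvMids a := by
        rw [pvMids_snoc, if_neg hcond]; simp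
      have hlast' : pvLastCut (a ++ [x]) = m := by
        rw [pvLastCut]; simp [hmids]; rfl
      constructor
      · rw [pvStepA, if_neg hc, hlast']
        simp only
        rw [List.drop_append_of_le_length (pvLastCut_le a), ih2]
      · rw [pvStepA, if_neg hc]
        simp only
        rw [hmids, pvShapeP_extend a [x] _ (pvPairs_cuts_bound a)]
        exact ih1

-- bridge: the Int-indexed port B computes the Nat-indexed shape of the cut pairs ------

lemma pvRangeNat (n : Nat) :
    PySem.List.pyRange 1 (n : Int) 1 =
      ((List.range n).filter (fun i => decide (i ≠ 0))).map Int.ofNat := by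
  induction n with
  | zero =>
    rw [show ((0 : Nat) : Int) = 0 by rfl, PySem.List.pyRange_one_eq_nil (by norm_num)]
    simp
  | succ m ih =>
    rcases Nat.eq_zero_or_pos m with rfl | hm
    · rw [show ((0 + 1 : Nat) : Int) = 1 by rfl, PySem.List.pyRange_one_eq_nil (by norm_num)]
      simp [List.range_succ]
    · rw [show ((m + 1 : Nat) : Int) = (m : Int) + 1 by push_cast; ring,
        PySem.List.pyRange_one_succ_right (by exact_mod_cast hm), ih,
        List.range_succ, List.filter_append, List.map_append]
      have : [m].filter (fun i => decide (i ≠ 0)) = [m] := by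
        simp [Nat.pos_iff_ne_zero.mp hm]
      rw [this]
      simp [Int.ofNat_eq_natCast]

lemma pvBridge (a : List Int) :
    detect_staffs_alt a = pvShapeP a (pvPairs (0 :: pvMids a ++ [a.length])) := by
  unfold detect_staffs_alt
  simp only
  have hmids :
      (PySem.List.pyRange 1 (a.length : Int) 1).filter
        (fun i => decide (pvThreshold <
          |PySem.List.pyGetD a i 0 - PySem.List.pyGetD a (i - 1) 0|)) =
      (pvMids a).map Int.ofNat := by
    rw [pvRangeNat, List.filter_map, List.filter_filter]
    unfold pvMids
    congr 1
    apply List.filter_congr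
    intro i hi
    by_cases h0 : i = 0
    · simp [h0]
    · have h1 : (1 : Nat) ≤ i := by omega
      have hg1 : PySem.List.pyGetD a ((i : Int)) 0 = a.getD i 0 :=
        PySem.List.pyGetD_natCast a i 0
      have hg2 : PySem.List.pyGetD a ((i : Int) - 1) 0 = a.getD (i - 1) 0 := by
        rw [show ((i : Int) - 1) = ((i - 1 : Nat) : Int) by push_cast [h1]; ring]
        exact PySem.List.pyGetD_natCast a (i - 1) 0
      simp [Function.comp, Int.ofNat_eq_natCast, hg1, hg2, h0, Bool.and_comm]
  rw [hmids]
  have hcuts : [(0 : Int)] ++ (pvMids a).map Int.ofNat ++ [(a.length : Int)] =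
      ((0 :: pvMids a ++ [a.length]).map Int.ofNat) := by
    simp [Int.ofNat_eq_natCast]
  rw [hcuts]
  set cn : List Nat := 0 :: pvMids a ++ [a.length] with hcn
  have htail : (cn.map Int.ofNat).tail = cn.tail.map Int.ofNat := by
    cases cn <;> simp
  rw [htail, List.zip_map, List.filter_map]
  have hpred : ((fun p : Int × Int => decide (5 ≤ p.2 - p.1)) ∘
        (Prod.map Int.ofNat Int.ofNat)) =
      (fun p : Nat × Nat => decide (p.1 + 5 ≤ p.2)) := by
    funext p
    rcases p with ⟨s, e⟩
    simp only [Function.comp, Prod.map]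
    rw [decide_eq_decide]
    simp [Int.ofNat_eq_natCast]
    omega
  rw [hpred, List.map_map]
  unfold pvShapeP pvPairs
  apply List.map_congr_left
  intro p hp
  have h5 : p.1 + 5 ≤ p.2 := by simpa using (List.mem_filter.mp hp).2
  rcases p with ⟨s, e⟩
  simp only [Function.comp, Prod.map] at h5 ⊢
  have hg1 : PySem.List.pyGetD a ((s : Int)) 0 = a.getD s 0 := PySem.List.pyGetD_natCast a s 0
  have hg2 : PySem.List.pyGetD a ((e : Int) - 1) 0 = a.getD (e - 1) 0 := by
    rw [show ((e : Int) - 1) = ((e - 1 : Nat) : Int) by push_cast [show (1:Nat) ≤ e by omega]; ring]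
    exact PySem.List.pyGetD_natCast a (e - 1) 0
  simp [Int.ofNat_eq_natCast, hg1, hg2]

-- index formulation of the last two elements of the open run -----------------

lemma pvDropLast_getLast! (a : List Int) (h : 2 ≤ a.length) :
    a.dropLast.getLast! = a.getD (a.length - 2) 0 := by
  have hne : a.dropLast ≠ [] := by
    intro hc
    have := congrArg List.length hc
    simp at this
    omega
  rw [pvGetLast!_eq_getD _ hne]
  simp only [List.getD_eq_getElem?_getD, List.getElem?_dropLast, List.length_dropLast]
  rw [if_pos (by omega), show a.length - 1 - 1 = a.length - 2 by omega]

-- ===== VERDICT (by name: the statement is the Claim_ definition above) =====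
theorem detect_staffs_spec : Claim_equal_detect_staffs := by
  intro a _
  unfold Spec_detect_staffs
  obtain ⟨h2, h1⟩ := pvInv a
  rw [pvBridge a, show (0 : Nat) :: pvMids a ++ [a.length] = (0 :: pvMids a) ++ [a.length] by simp,
    pvPairs_snoc (0 :: pvMids a) (by simp) a.length, pvShapeP_append]
  have hgl : (0 :: pvMids a).getLast (by simp) = pvLastCut a := rfl
  rw [hgl]
  unfold detect_staffs
  simp only
  set m := pvLastCut a with hm
  have hmle : m ≤ a.length := pvLastCut_le a
  rw [h1, h2]
  have hlen : (a.drop m).length = a.length - m := by simp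
  by_cases h5 : 5 ≤ (a.drop m).length
  · have hane : a ≠ [] := by
      intro hc; subst hc; simp at h5
    have hml : m < a.length := pvLastCut_lt a hane
    have hsub : 5 ≤ a.length - m := by omega
    have hdne : a.drop m ≠ [] := by
      simp only [ne_eq, List.drop_eq_nil_iff]; omega
    have hlast : (a.drop m).getLast! = a.getD (a.length - 1) 0 := by
      rw [pvGetLast!_drop a m hdne, pvGetLast!_eq_getD a hane]
    have hprev : (a.drop m).dropLast.getLast! = a.getD (a.length - 2) 0 := by
      rw [pvDropLast_getLast! _ (by omega), hlen]
      simp only [List.getD_eq_getElem?_getD, List.getElem?_drop]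
      congr 2
      omega
    have hok : |(a.drop m).dropLast.getLast! - (a.drop m).getLast!| ≤ pvThreshold := by
      rw [hlast, hprev, abs_sub_comm]
      have := pvNoGap a (i := a.length - 1) (by omega) (by omega)
      have h1' : a.length - 1 - 1 = a.length - 2 := by omega
      rwa [h1'] at this
    rw [if_pos h5, if_pos hok, if_pos (by omega)]
    rw [pvHead!_drop a m hml, hlast]
  · rw [if_neg h5, if_neg (by omega)]
    simp
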